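-- pv_equiv track=rewrite | github.com/Guy-L/parakit | utils.py | char_after_digits
-- ===== SOURCE A (Python) =====
-- def char_after_digits(s): #used for handling ECL sub names
--     has_number = False
--     for char in s:
--         if char.isdigit():
--             has_number = True
--         elif has_number:
--             return True
--     return False
-- ===== SOURCE B (Python) =====
-- def char_after_digits(s):
--     # Stage 1: drop the prefix of non-digit characters.
--     tail = s
--     while tail and not tail[0].isdigit():
--         tail = tail[1:]
--     # Stage 2: the remainder (starting at the first digit, or empty) holds a
--     # non-digit iff some character appears after a digit.
--     return any(not c.isdigit() for c in tail)
-- ===== Notes on version B (the rewrite author's own statement) =====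
-- stated objective: simpler
-- what changed: Instead of one stateful loop carrying a has_number flag with an early return, B is two staged stateless passes: drop the non-digit prefix, then test whether any non-digit remains.
import Mathlib
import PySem

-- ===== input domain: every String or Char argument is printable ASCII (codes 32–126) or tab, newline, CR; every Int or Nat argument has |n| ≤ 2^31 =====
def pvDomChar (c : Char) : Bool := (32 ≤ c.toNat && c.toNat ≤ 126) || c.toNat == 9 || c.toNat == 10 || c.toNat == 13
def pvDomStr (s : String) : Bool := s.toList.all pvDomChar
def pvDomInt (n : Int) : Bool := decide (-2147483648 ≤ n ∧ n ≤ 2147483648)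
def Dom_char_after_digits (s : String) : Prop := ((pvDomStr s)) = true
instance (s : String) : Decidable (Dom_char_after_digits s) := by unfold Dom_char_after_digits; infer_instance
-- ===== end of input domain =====

-- B replaces A's single stateful has_number-flag loop by two staged stateless passes: drop the non-digit prefix, then test whether any non-digit remains (simpler decomposition).


-- ===== PORT A =====
-- A's loop over the characters carrying the has_number flag, with the early `return True`.
def pvALoop : List Char → Bool → Bool
  | [], _ => false
  | c :: rest, hasNumber =>
    if PySem.Chars.isdigit c then pvALoop rest true
    else if hasNumber then true
    else pvALoop rest hasNumber

def char_after_digits (s : String) : Bool := pvALoop s.toList false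

-- ===== PORT B =====
-- Source B's stage 1 while-loop peels non-digit characters off the front = List.dropWhile;
-- stage 2's `any(not c.isdigit() ...)` over the remainder = List.any.
def char_after_digits_alt (s : String) : Bool :=
  (s.toList.dropWhile (fun c => !PySem.Chars.isdigit c)).any
    (fun c => !PySem.Chars.isdigit c)

-- ===== PRECONDITION & SPEC =====
def Spec_char_after_digits (s : String) (out : Bool) : Prop := out = char_after_digits_alt s
instance (s : String) (out : Bool) : Decidable (Spec_char_after_digits s out) := by unfold Spec_char_after_digits; infer_instance

-- ===== CLAIM (what is proved, stated in full; the proofs are below) =====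
def Claim_equal_char_after_digits : Prop := ∀ (s : String), Dom_char_after_digits s → Spec_char_after_digits s (char_after_digits s)

-- ===== LEMMAS AND PROOFS =====
-- Once A has seen a digit, its remaining run returns true iff some later char is a non-digit.
theorem pvALoop_true (l : List Char) : pvALoop l true = l.any (fun c => !PySem.Chars.isdigit c) := by
  induction l with
  | nil => rfl
  | cons c rest ih =>
    simp only [pvALoop, List.any_cons]
    by_cases h : PySem.Chars.isdigit c = true <;> simp [h, ih]

theorem pvALoop_eq_alt (l : List Char) :
    pvALoop l false = (l.dropWhile (fun c => !PySem.Chars.isdigit c)).any (fun c => !PySem.Chars.isdigit c) := by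
  induction l with
  | nil => rfl
  | cons c rest ih =>
    simp only [pvALoop, List.dropWhile_cons]
    by_cases h : PySem.Chars.isdigit c = true <;> simp [h, ih, pvALoop_true]

-- ===== VERDICT (by name: the statement is the Claim_ definition above) =====
theorem char_after_digits_spec : Claim_equal_char_after_digits := by
  intro s _
  unfold Spec_char_after_digits char_after_digits char_after_digits_alt
  exact pvALoop_eq_alt s.toList
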